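-- pv_equiv track=rewrite | github.com/qingchenyouforcc/morse-structured-encoding-paper | sequence_utils.py | same_length_runs
-- ===== SOURCE A (Python) =====
-- def same_length_runs(codes: list[str]) -> list[list[str]]:
--     if not codes:
--         return []
--
--     runs: list[list[str]] = []
--     current = [codes[0]]
--     for code in codes[1:]:
--         if len(code) == len(current[-1]):
--             current.append(code)
--         else:
--             runs.append(current)
--             current = [code]
--     runs.append(current)
--     return runs
-- ===== SOURCE B (Python) =====
-- def same_length_runs(codes: list[str]) -> list[list[str]]:
--     # Two-pointer span-splitting: find the end j of each maximal equal-length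
--     # span starting at i, slice it out, and continue from j.
--     runs = []
--     i = 0
--     n = len(codes)
--     while i < n:
--         j = i + 1
--         while j < n and len(codes[j]) == len(codes[i]):
--             j += 1
--         runs.append(codes[i:j])
--         i = j
--     return runs
-- ===== Notes on version B (the rewrite author's own statement) =====
-- stated objective: alternative
-- what changed: Replaced the accumulator loop (growing a current run and comparing each code against current[-1]) by a two-pointer span split that locates the end of each maximal equal-length span and slices it out whole.
import Mathlib
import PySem

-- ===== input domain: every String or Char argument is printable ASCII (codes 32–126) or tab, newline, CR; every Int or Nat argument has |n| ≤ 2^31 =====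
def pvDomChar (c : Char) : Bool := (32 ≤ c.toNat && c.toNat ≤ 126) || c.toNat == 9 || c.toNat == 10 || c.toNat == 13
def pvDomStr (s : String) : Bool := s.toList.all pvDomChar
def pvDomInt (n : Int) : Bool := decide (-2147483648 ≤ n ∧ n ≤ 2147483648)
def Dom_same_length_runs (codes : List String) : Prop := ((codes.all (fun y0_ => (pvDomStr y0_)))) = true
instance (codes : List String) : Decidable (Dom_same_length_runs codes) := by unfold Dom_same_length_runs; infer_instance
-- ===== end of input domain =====

-- B replaces A's accumulator loop by a recursive maximal-leading-run split; same cost, different decomposition.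

-- ===== PORT A =====
-- loop body of A: state = (runs, current); current is nonempty throughout
def pvStepA (s : List (List String) × List String) (code : String) :
    List (List String) × List String :=
  if PySem.Str.len code = PySem.Str.len (PySem.List.pyGetD s.2 (-1) "") then
    (s.1, s.2 ++ [code])
  else
    (s.1 ++ [s.2], [code])

def same_length_runs (codes : List String) : List (List String) :=
  match codes with
  | [] => []
  | c :: rest =>
    let s := rest.foldl pvStepA ([], [c])
    s.1 ++ [s.2]

-- ===== PORT B =====
def same_length_runs_alt : List String → List (List String)
  | [] => []
  | c :: rest =>
    -- while loop scanning the maximal prefix of equal length = takeWhile/dropWhile split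
    (c :: rest.takeWhile (fun x => PySem.Str.len x = PySem.Str.len c)) ::
      same_length_runs_alt (rest.dropWhile (fun x => PySem.Str.len x = PySem.Str.len c))
termination_by codes => codes.length
decreasing_by
  simp only [List.length_cons]
  exact Nat.lt_succ_of_le (List.length_dropWhile_le _ _)

-- ===== PRECONDITION & SPEC =====
def Spec_same_length_runs (codes : List String) (out : List (List String)) : Prop := out = same_length_runs_alt codes
instance (codes : List String) (out : List (List String)) : Decidable (Spec_same_length_runs codes out) := by unfold Spec_same_length_runs; infer_instance

-- ===== CLAIM (what is proved, stated in full; the proofs are below) =====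
def Claim_equal_same_length_runs : Prop := ∀ (codes : List String), Dom_same_length_runs codes → Spec_same_length_runs codes (same_length_runs codes)

-- ===== LEMMAS AND PROOFS =====

-- unfolding lemma for the well-founded recursion of B's port
lemma alt_cons (c : String) (rest : List String) :
    same_length_runs_alt (c :: rest) =
      (c :: rest.takeWhile (fun x => PySem.Str.len x = PySem.Str.len c)) ::
        same_length_runs_alt (rest.dropWhile (fun x => PySem.Str.len x = PySem.Str.len c)) := by
  rw [same_length_runs_alt]

-- loop invariant of A's fold: it finishes the current run (the maximal extension of
-- `cur` by codes of length L) and then behaves like B on the remainder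
lemma pvFold_key (rest : List String) :
    ∀ (runs : List (List String)) (cur : List String) (L : Int),
      PySem.Str.len (PySem.List.pyGetD cur (-1) "") = L →
      (rest.foldl pvStepA (runs, cur)).1 ++ [(rest.foldl pvStepA (runs, cur)).2] =
        runs ++ (cur ++ rest.takeWhile (fun x => PySem.Str.len x = L)) ::
          same_length_runs_alt (rest.dropWhile (fun x => PySem.Str.len x = L)) := by
  induction rest with
  | nil =>
    intro runs cur L hL
    simp only [List.foldl_nil, List.takeWhile_nil, List.dropWhile_nil]
    rw [same_length_runs_alt]
    simp
  | cons code rest ih =>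
    intro runs cur L hL
    by_cases hc : PySem.Str.len code = L
    · have hstep : pvStepA (runs, cur) code = (runs, cur ++ [code]) := by
        unfold pvStepA; rw [hL, if_pos hc]
      have hlast : PySem.Str.len (PySem.List.pyGetD (cur ++ [code]) (-1) "") = L := by
        rw [PySem.List.pyGetD_neg_one_append_singleton]; exact hc
      simp only [List.foldl_cons, hstep, List.takeWhile_cons, List.dropWhile_cons, hc,
        decide_true, if_true]
      rw [ih runs (cur ++ [code]) L hlast]
      simp
    · have hstep : pvStepA (runs, cur) code = (runs ++ [cur], [code]) := by
        unfold pvStepA; rw [hL, if_neg hc]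
      have hlast : PySem.Str.len (PySem.List.pyGetD ([code] : List String) (-1) "") =
          PySem.Str.len code := by
        rw [show ([code] : List String) = [] ++ [code] from rfl,
          PySem.List.pyGetD_neg_one_append_singleton]
      simp only [List.foldl_cons, hstep, List.takeWhile_cons, List.dropWhile_cons, hc,
        decide_false, Bool.false_eq_true, if_false]
      rw [ih (runs ++ [cur]) [code] (PySem.Str.len code) hlast, alt_cons]
      simp

-- ===== VERDICT (by name: the statement is the Claim_ definition above) =====
theorem same_length_runs_spec : Claim_equal_same_length_runs := by
  intro codes _
  unfold Spec_same_length_runs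
  cases codes with
  | nil => rw [same_length_runs_alt]; rfl
  | cons c rest =>
    show (rest.foldl pvStepA ([], [c])).1 ++ [(rest.foldl pvStepA ([], [c])).2] = _
    have hlast : PySem.Str.len (PySem.List.pyGetD ([c] : List String) (-1) "") =
        PySem.Str.len c := by
      rw [show ([c] : List String) = [] ++ [c] from rfl,
        PySem.List.pyGetD_neg_one_append_singleton]
    rw [pvFold_key rest [] [c] (PySem.Str.len c) hlast]
    rw [same_length_runs_alt]
    simp
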